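-- pv_equiv track=rewrite | github.com/KiaraGrouwstra/sat-sudoku | src/test_sat.py | simplify_initial
-- ===== SOURCE A (Python) =====
-- U = 0
--
-- Y = 1
--
-- N = -1
--
-- def rev_enum(lst):
--   '''reverse enumeration, so we can safely remove stuff without messing up our indices'''
--   return list(enumerate(lst))[::-1]
--
-- def simplify_initial(rules, facts):
--   '''do a one-time clean-up of tautologous and pure-literal clauses.'''
--   for (rules_idx, ors) in rev_enum(rules):
--
--     # tautology: p or not p is redundant
--     # TODO: handle cases where we have multiple instances of the same variable with the same beliefs
--     # group beliefs by key
--     res = {}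
--     for (key, belief) in ors:
--       res.setdefault(key, []).append(belief)
--     # check if any key has multiple (= complementing) beliefs
--     if any(map(lambda arr: len(set(arr)) > 1, res.values())):
--       # ditch fact
--       # TODO: switch to linked list for constant-time deletions
--       # TODO: or instead just create new list for the whole pass
--       del rules[rules_idx]
--       continue
--
--     # clean out pure literals
--     # TODO: properly implement pure literal removal, which actually means checking if a variable only has positive/negative occurrences left!
--     # if only one option...
--     if len(ors) == 1:
--       [(key, belief)] = ors
--       if facts[key] == -belief:  # opposite beliefs
--         # clash detected, report it
--         return (N, [], [])
--       else:
--         # consider it fact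
--         facts[key] = belief
--       # we've exhausted the info in this rule, so get rid of it
--       del rules[rules_idx]
--       continue
--
--   sat = U if len(rules) else Y
--   return (sat, rules, facts)
-- ===== SOURCE B (Python) =====
-- U = 0
-- Y = 1
-- N = -1
--
-- def _is_taut(ors):
--     '''a clause is tautologous iff some variable occurs with two different beliefs:
--     single pass keeping the first belief seen per variable, short-circuiting.'''
--     seen = {}
--     for (key, belief) in ors:
--         if seen.setdefault(key, belief) != belief:
--             return True
--     return False
--
-- def simplify_initial(rules, facts):
--     '''two passes: filter out tautologies, then consume unit clauses back-to-front.
--     (return value only: A also mutates the rules list in place, B does not.)'''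
--     kept = [ors for ors in rules if not _is_taut(ors)]
--     remaining = []
--     for ors in reversed(kept):
--         if len(ors) == 1:
--             (key, belief) = ors[0]
--             if facts[key] == -belief:
--                 return (N, [], [])
--             facts[key] = belief
--         else:
--             remaining.append(ors)
--     remaining.reverse()
--     return ((U if remaining else Y), remaining, facts)
-- ===== Notes on version B (the rewrite author's own statement) =====
-- stated objective: alternative
-- what changed: Replaced the single reverse pass with index-based in-place list deletions and a full per-clause grouping dict by two passes: a filter keeping non-tautologies (detected by a short-circuiting first-belief-per-key scan) and a reverse scan that consumes unit clauses while updating facts, appending survivors and reversing at the end.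
-- outside the precondition, e.g. on simplify_initial([[(2, 1)], [(1, 1)]], {1: -1}): A returns (-1, [], {}), B returns (-1, [], {})
import Mathlib
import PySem

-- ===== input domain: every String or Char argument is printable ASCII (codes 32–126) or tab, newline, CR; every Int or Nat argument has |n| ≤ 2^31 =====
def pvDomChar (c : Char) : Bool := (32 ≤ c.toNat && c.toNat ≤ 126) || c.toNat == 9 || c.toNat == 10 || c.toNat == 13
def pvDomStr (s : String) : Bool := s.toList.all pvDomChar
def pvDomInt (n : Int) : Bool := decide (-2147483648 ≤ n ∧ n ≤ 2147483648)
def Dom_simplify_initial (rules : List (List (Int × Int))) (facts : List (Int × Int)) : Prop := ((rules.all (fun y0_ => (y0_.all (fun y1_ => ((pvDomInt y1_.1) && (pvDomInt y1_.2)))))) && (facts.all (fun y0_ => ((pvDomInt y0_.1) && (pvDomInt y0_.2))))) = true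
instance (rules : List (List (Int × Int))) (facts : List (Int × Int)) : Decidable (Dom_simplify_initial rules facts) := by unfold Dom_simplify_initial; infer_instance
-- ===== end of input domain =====

-- B replaces A's indexed in-place deletions and per-clause grouping dict by a tautology filter pass
-- plus a reverse unit-consuming scan (return-value equivalence only: A also mutates its rules/facts
-- arguments in place, B mutates only facts).

-- ===== PORT A =====
-- rev_enum lst = list(enumerate(lst))[::-1]
def pvRevEnum {α : Type} (lst : List α) : List (Int × α) :=
  (PySem.List.slice? (PySem.List.enumerate lst 0) none none (-1)).getD []

-- the tautology test of A: group beliefs by key, then check some group has > 1 distinct belief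
def pvTautA (ors : List (Int × Int)) : Bool :=
  let res : PySem.Dict Int (List Int) :=
    ors.foldl (fun d kb => d.modify kb.1 [] (fun arr => arr ++ [kb.2])) PySem.Dict.empty
  res.values.any (fun arr => decide (1 < (PySem.Set.ofList arr).length))

-- the main loop of A over rev_enum rules, deleting from the current rules list by index
def pvLoopA : List (Int × List (Int × Int)) → List (List (Int × Int)) → PySem.Dict Int Int →
    Int × (List (List (Int × Int))) × (List (Int × Int))
  | [], cur, f => (if cur.length ≠ 0 then 0 else 1, cur, f.items)
  | (i, ors) :: rest, cur, f =>
    if pvTautA ors then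
      match PySem.List.pop? cur i with        -- del rules[rules_idx]
      | some (_, cur') => pvLoopA rest cur' f
      | none => pvLoopA rest cur f            -- unreachable: the index is always valid
    else if ors.length == 1 then
      match ors with
      | [(key, belief)] =>
        match f.get? key with
        | none => (-1, [], [])                -- Python raises KeyError here; excluded by Pre_
        | some v =>
          if v == -belief then (-1, [], [])
          else
            match PySem.List.pop? cur i with  -- del rules[rules_idx]
            | some (_, cur') => pvLoopA rest cur' (f.insert key belief)
            | none => pvLoopA rest cur (f.insert key belief)
      | _ => pvLoopA rest cur f               -- unreachable: ors has length 1
    else pvLoopA rest cur f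

def simplify_initial (rules : List (List (Int × Int))) (facts : List (Int × Int)) :
    Int × (List (List (Int × Int))) × (List (Int × Int)) :=
  pvLoopA (pvRevEnum rules) rules (PySem.Dict.ofList facts)

-- ===== PORT B =====
-- _is_taut: one pass keeping the first belief seen per key, short-circuiting on a mismatch
def pvIsTautB : List (Int × Int) → PySem.Dict Int Int → Bool
  | [], _ => false
  | (key, belief) :: rest, seen =>
    if ((seen.get? key).getD belief) != belief then true
    else pvIsTautB rest (seen.setdefault key belief)

-- reverse scan over the filtered clauses: consume unit clauses, collect the others, reverse at the end
def pvLoopB : List (List (Int × Int)) → List (List (Int × Int)) → PySem.Dict Int Int →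
    Int × (List (List (Int × Int))) × (List (Int × Int))
  | [], remaining, f =>
    (if remaining.reverse ≠ [] then 0 else 1, remaining.reverse, f.items)
  | ors :: rest, remaining, f =>
    if ors.length == 1 then
      match ors with
      | [(key, belief)] =>
        match f.get? key with
        | none => (-1, [], [])                -- Python raises KeyError here; excluded by Pre_
        | some v =>
          if v == -belief then (-1, [], [])
          else pvLoopB rest remaining (f.insert key belief)
      | _ => pvLoopB rest remaining f         -- unreachable: ors has length 1
    else pvLoopB rest (remaining ++ [ors]) f

def simplify_initial_alt (rules : List (List (Int × Int))) (facts : List (Int × Int)) :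
    Int × (List (List (Int × Int))) × (List (Int × Int)) :=
  let kept := rules.filter (fun ors => !(pvIsTautB ors PySem.Dict.empty))
  pvLoopB kept.reverse [] (PySem.Dict.ofList facts)

-- ===== PRECONDITION & SPEC =====
-- Pre_ excludes inputs where some unit clause's variable is missing from facts: there Python's
-- facts[key] lookup raises KeyError (except when an earlier clash returns first; on those excluded
-- inputs both programs return the same clash triple anyway).
def Pre_simplify_initial (rules : List (List (Int × Int))) (facts : List (Int × Int)) : Prop :=
  ∀ ors ∈ rules, ors.length = 1 → ∀ p ∈ ors, p.1 ∈ facts.map Prod.fst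
instance (rules : List (List (Int × Int))) (facts : List (Int × Int)) : Decidable (Pre_simplify_initial rules facts) := by unfold Pre_simplify_initial; infer_instance
def pvWitness_simplify_initial : (List (List (Int × Int))) × (List (Int × Int)) :=
  ([[(1, 1)], [(1, -1), (2, 1)]], [(1, 1), (2, -1)])

def Spec_simplify_initial (rules : List (List (Int × Int))) (facts : List (Int × Int)) (out : Int × (List (List (Int × Int))) × (List (Int × Int))) : Prop := out = simplify_initial_alt rules facts
instance (rules : List (List (Int × Int))) (facts : List (Int × Int)) (out : Int × (List (List (Int × Int))) × (List (Int × Int))) : Decidable (Spec_simplify_initial rules facts out) := by unfold Spec_simplify_initial; infer_instance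

-- ===== CLAIM (what is proved, stated in full; the proofs are below) =====
def Claim_equal_simplify_initial : Prop := ∀ (rules : List (List (Int × Int))) (facts : List (Int × Int)), Dom_simplify_initial rules facts → Pre_simplify_initial rules facts → Spec_simplify_initial rules facts (simplify_initial rules facts)

-- ===== LEMMAS AND PROOFS =====

lemma pvRevEnum_eq {α : Type} (lst : List α) :
    pvRevEnum lst = (PySem.List.enumerate lst 0).reverse := by
  simp [pvRevEnum, PySem.List.slice?_none_none_neg_one]

-- A's grouping fold, named for the proofs
def pvGroup (ors : List (Int × Int)) (d : PySem.Dict Int (List Int)) : PySem.Dict Int (List Int) :=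
  ors.foldl (fun d kb => d.modify kb.1 [] (fun arr => arr ++ [kb.2])) d

def pvMixed (d : PySem.Dict Int (List Int)) : Bool :=
  d.values.any (fun arr => decide (1 < (PySem.Set.ofList arr).length))

lemma pvTautA_group (ors : List (Int × Int)) :
    pvTautA ors = pvMixed (pvGroup ors PySem.Dict.empty) := rfl

-- invariant tying A's group dict to B's first-belief dict
def pvRel (d : PySem.Dict Int (List Int)) (seen : PySem.Dict Int Int) : Prop :=
  d.keys = seen.keys ∧ d.keys.Nodup ∧
  ∀ k : Int, k ∈ d.keys → d.getD k [] ≠ [] ∧ ∀ x ∈ d.getD k [], seen.get? k = some x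

lemma pv_nodup_modify (d : PySem.Dict Int (List Int)) (k : Int) (b : Int)
    (h : d.keys.Nodup) : (d.modify k [] (fun arr => arr ++ [b])).keys.Nodup := by
  have := PySem.Dict.nodup_keys_foldl_modify_key [(k, b)] (fun kb => kb.1) []
      (fun _ kb arr => arr ++ [kb.2]) d h
  simpa using this

lemma pv_keys_modify (d : PySem.Dict Int (List Int)) (k : Int) (b : Int) (hk : k ∈ d.keys) :
    (d.modify k [] (fun arr => arr ++ [b])).keys = d.keys := by
  rw [PySem.Dict.keys_modify]
  exact PySem.Dict.keys_insert_of_contains d _ ((PySem.Dict.contains_iff_mem_keys _ _).2 hk)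

lemma pv_keys_modify_new (d : PySem.Dict Int (List Int)) (k : Int) (b : Int) (hk : k ∉ d.keys) :
    (d.modify k [] (fun arr => arr ++ [b])).keys = d.keys ++ [k] := by
  rw [PySem.Dict.keys_modify]
  exact PySem.Dict.keys_insert_of_not_contains d _
    (by rw [← Bool.not_eq_true, PySem.Dict.contains_iff_mem_keys]; exact hk)

lemma pv_len_le_one {l : List Int} {v : Int} (hn : l.Nodup) (h : ∀ x ∈ l, x = v) :
    l.length ≤ 1 := by
  match l, hn with
  | [], _ => simp
  | [a], _ => simp
  | a :: b :: t, hn =>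
    exfalso
    have ha := h a (by simp)
    have hb := h b (by simp)
    subst ha; subst hb
    simp at hn

lemma pv_one_lt {l : List Int} {a b : Int} (ha : a ∈ l) (hb : b ∈ l) (hne : a ≠ b) :
    1 < l.length := by
  match l with
  | [] => simp at ha
  | [x] => simp at ha hb; exact absurd (ha.trans hb.symm) hne
  | x :: y :: t => simp

lemma pvMixed_keys (d : PySem.Dict Int (List Int)) (h : d.keys.Nodup) :
    pvMixed d = d.keys.any (fun k => decide (1 < (PySem.Set.ofList (d.getD k [])).length)) := by
  rw [pvMixed, PySem.Dict.values_eq_map_keys d h [], List.any_map]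
  rfl

lemma pvMixed_false_of_rel {d : PySem.Dict Int (List Int)} {seen : PySem.Dict Int Int}
    (h : pvRel d seen) : pvMixed d = false := by
  obtain ⟨hkeys, hnd, hval⟩ := h
  rw [pvMixed_keys d hnd, List.any_eq_false]
  intro k hk
  obtain ⟨hne, hall⟩ := hval k hk
  simp only [decide_eq_true_eq, not_lt]
  obtain ⟨v, hv⟩ : ∃ v, seen.get? k = some v := by
    rcases hw : d.getD k [] with _ | ⟨x, t⟩
    · exact absurd hw hne
    · exact ⟨x, hall x (by rw [hw]; simp)⟩
  exact pv_len_le_one (PySem.Set.nodup_ofList _) (fun x hx =>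
    (Option.some.inj (hv.symm.trans (hall x ((PySem.Set.mem_ofList _ _).1 hx)))).symm)

lemma pv_add_len (s : List Int) (x : Int) :
    s.length ≤ (PySem.Set.add s x).length := by
  rw [PySem.Set.add_eq_ite]
  split <;> simp

lemma pv_nodup_append_singleton {l : List Int} {k : Int} (hnd : l.Nodup) (hk : k ∉ l) :
    (l ++ [k]).Nodup := by
  apply List.Nodup.append hnd (List.nodup_singleton _)
  intro a ha hb
  simp only [List.mem_singleton] at hb
  subst hb
  exact hk ha

lemma pvMixed_modify_true (d : PySem.Dict Int (List Int)) (k b : Int)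
    (hnd : d.keys.Nodup) (h : pvMixed d = true) :
    pvMixed (d.modify k [] (fun arr => arr ++ [b])) = true := by
  rw [pvMixed_keys d hnd, List.any_eq_true] at h
  obtain ⟨k', hk', hlt⟩ := h
  simp only [decide_eq_true_eq] at hlt
  by_cases hkk : k ∈ d.keys
  · rw [pvMixed_keys _ (by rw [pv_keys_modify d k b hkk]; exact hnd), List.any_eq_true]
    refine ⟨k', by rw [pv_keys_modify d k b hkk]; exact hk', ?_⟩
    simp only [decide_eq_true_eq, PySem.Dict.getD_modify]
    split
    · next heq =>
      subst heq
      rw [PySem.Set.ofList_append_singleton]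
      exact lt_of_lt_of_le hlt (pv_add_len _ _)
    · exact hlt
  · rw [pvMixed_keys _ (by rw [pv_keys_modify_new d k b hkk]; exact pv_nodup_append_singleton hnd hkk), List.any_eq_true]
    refine ⟨k', by rw [pv_keys_modify_new d k b hkk]; exact List.mem_append_left _ hk', ?_⟩
    simp only [decide_eq_true_eq, PySem.Dict.getD_modify]
    split
    · next heq => subst heq; exact absurd hk' hkk
    · exact hlt

lemma pvMixed_modify_clash (d : PySem.Dict Int (List Int)) (k b v : Int)
    (hnd : d.keys.Nodup) (hc : k ∈ d.keys) (hvb : v ≠ b)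
    (hne : d.getD k [] ≠ []) (hall : ∀ x ∈ d.getD k [], x = v) :
    pvMixed (d.modify k [] (fun arr => arr ++ [b])) = true := by
  rw [pvMixed_keys _ (by rw [pv_keys_modify d k b hc]; exact hnd), List.any_eq_true]
  refine ⟨k, by rw [pv_keys_modify d k b hc]; exact hc, ?_⟩
  simp only [decide_eq_true_eq, PySem.Dict.getD_modify, if_pos]
  have hvmem : v ∈ d.getD k [] := by
    rcases hw : d.getD k [] with _ | ⟨x, t⟩
    · exact absurd hw hne
    · have hx := hall x (by rw [hw]; simp)
      subst hx
      simp
  apply pv_one_lt (a := v) (b := b) _ _ hvb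
  · rw [PySem.Set.mem_ofList]
    exact List.mem_append_left _ hvmem
  · rw [PySem.Set.mem_ofList]
    simp

lemma pvMixed_group_true : ∀ (ors : List (Int × Int)) (d : PySem.Dict Int (List Int)),
    d.keys.Nodup → pvMixed d = true → pvMixed (pvGroup ors d) = true := by
  intro ors
  induction ors with
  | nil => intro d _ h; exact h
  | cons kb rest ih =>
    intro d hnd h
    simp only [pvGroup, List.foldl_cons]
    exact ih _ (pv_nodup_modify d kb.1 kb.2 hnd) (pvMixed_modify_true d kb.1 kb.2 hnd h)

lemma pvTaut_core : ∀ (ors : List (Int × Int)) (d : PySem.Dict Int (List Int))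
    (seen : PySem.Dict Int Int), pvRel d seen → pvMixed (pvGroup ors d) = pvIsTautB ors seen := by
  intro ors
  induction ors with
  | nil => intro d seen h; simpa [pvGroup, pvIsTautB] using pvMixed_false_of_rel h
  | cons kb rest ih =>
    obtain ⟨k, b⟩ := kb
    intro d seen hrel
    obtain ⟨hkeys, hnd, hval⟩ := hrel
    simp only [pvGroup, List.foldl_cons, pvIsTautB]
    by_cases hc : k ∈ d.keys
    · obtain ⟨hne', hall'⟩ := hval k hc
      obtain ⟨v, hv⟩ : ∃ v, seen.get? k = some v := by
        rcases hw : d.getD k [] with _ | ⟨x, t⟩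
        · exact absurd hw hne'
        · exact ⟨x, hall' x (by rw [hw]; simp)⟩
      have hallv : ∀ x ∈ d.getD k [], x = v := fun x hx =>
        (Option.some.inj (hv.symm.trans (hall' x hx))).symm
      rw [hv]
      by_cases hvb : v = b
      · subst hvb
        have hcond : ¬ ((((some v).getD v) != v) = true) := by simp
        rw [if_neg hcond]
        rw [PySem.Dict.setdefault_of_contains seen v
          ((PySem.Dict.contains_iff_mem_keys _ _).2 (hkeys ▸ hc))]
        apply ih
        refine ⟨by rw [pv_keys_modify d k v hc]; exact hkeys,
          by rw [pv_keys_modify d k v hc]; exact hnd, ?_⟩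
        intro k' hk'
        rw [pv_keys_modify d k v hc] at hk'
        obtain ⟨hne, hall⟩ := hval k' hk'
        rw [PySem.Dict.getD_modify]
        split
        · next heq =>
          subst heq
          refine ⟨by simp, ?_⟩
          intro x hx
          rcases List.mem_append.1 hx with hx | hx
          · exact hall x hx
          · simp only [List.mem_singleton] at hx; subst hx; exact hv
        · exact ⟨hne, hall⟩
      · have hcond : (((some v).getD b) != b) = true := by simp [hvb]
        rw [if_pos hcond]
        apply pvMixed_group_true rest _ (pv_nodup_modify d k b hnd)
        exact pvMixed_modify_clash d k b v hnd hc hvb hne' hallv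
    · have hcc : seen.contains k = false := by
        rw [← Bool.not_eq_true, PySem.Dict.contains_iff_mem_keys]; exact hkeys ▸ hc
      have hget : seen.get? k = none := (PySem.Dict.get?_eq_none_iff_contains _ _).2 hcc
      rw [hget]
      have hcond : ¬ ((((none : Option Int).getD b) != b) = true) := by simp
      rw [if_neg hcond]
      rw [PySem.Dict.setdefault_of_not_contains seen b hcc]
      apply ih
      have hdk : d.contains k = false := by
        rw [← Bool.not_eq_true, PySem.Dict.contains_iff_mem_keys]; exact hc
      refine ⟨?_, by rw [pv_keys_modify_new d k b hc]; exact pv_nodup_append_singleton hnd hc, ?_⟩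
      · rw [pv_keys_modify_new d k b hc,
          PySem.Dict.keys_insert_of_not_contains seen b hcc, hkeys]
      · intro k' hk'
        rw [pv_keys_modify_new d k b hc] at hk'
        rw [PySem.Dict.getD_modify, PySem.Dict.get?_insert]
        rcases List.mem_append.1 hk' with hk' | hk'
        · have hne' : k' ≠ k := fun h => hc (h ▸ hk')
          rw [if_neg hne', if_neg hne']
          exact hval k' hk'
        · simp only [List.mem_singleton] at hk'
          subst hk'
          rw [if_pos rfl, if_pos rfl, PySem.Dict.getD_of_not_contains d [] hdk]
          exact ⟨by simp, by intro x hx; simp at hx; subst hx; rfl⟩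

lemma pvTautA_eq (ors : List (Int × Int)) :
    pvTautA ors = pvIsTautB ors PySem.Dict.empty := by
  rw [pvTautA_group]
  exact pvTaut_core ors PySem.Dict.empty PySem.Dict.empty
    ⟨by simp, by simp, by intro k hk; simp at hk⟩

lemma pv_pop_append (rs : List (List (Int × Int))) (c : List (Int × Int))
    (T : List (List (Int × Int))) :
    PySem.List.pop? (rs ++ c :: T) (rs.length : Int) = some (c, rs ++ T) := by
  rw [PySem.List.pop?_natCast _ rs.length (by simp)]
  congr 2
  · rw [List.getElem_append_right (le_refl _)]
    simp
  · rw [List.eraseIdx_append_of_length_le (le_refl _)]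
    simp

lemma pvMain (rs : List (List (Int × Int))) : ∀ (acc : List (List (Int × Int)))
    (f : PySem.Dict Int Int),
    pvLoopA ((PySem.List.enumerate rs 0).reverse) (rs ++ acc.reverse) f
      = pvLoopB ((rs.filter (fun ors => !(pvIsTautB ors PySem.Dict.empty))).reverse) acc f := by
  induction rs using List.reverseRecOn with
  | nil =>
    intro acc f
    simp only [PySem.List.enumerate_nil, List.reverse_nil, List.nil_append, List.filter_nil,
      pvLoopA, pvLoopB]
    congr 1
    simp [List.length_eq_zero_iff]
  | append_singleton rs' c ih =>
    intro acc f
    rw [PySem.List.enumerate_append]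
    have hrev : (PySem.List.enumerate rs' 0 ++ PySem.List.enumerate [c] (0 + (rs'.length : Int))).reverse
        = ((rs'.length : Int), c) :: (PySem.List.enumerate rs' 0).reverse := by
      simp [PySem.List.enumerate_cons]
    rw [hrev]
    have hcur : rs' ++ [c] ++ acc.reverse = rs' ++ c :: acc.reverse := by simp
    rw [hcur, List.filter_append]
    by_cases ht : pvTautA c = true
    · have htB : pvIsTautB c PySem.Dict.empty = true := by rw [← pvTautA_eq]; exact ht
      have hfc : [c].filter (fun ors => !(pvIsTautB ors PySem.Dict.empty)) = [] := by
        simp [htB]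
      rw [hfc, List.append_nil]
      simp only [pvLoopA, ht, if_true, pv_pop_append]
      exact ih acc f
    · have ht' : pvTautA c = false := by simpa using ht
      have htB : pvIsTautB c PySem.Dict.empty = false := by rw [← pvTautA_eq]; exact ht'
      have hfc : [c].filter (fun ors => !(pvIsTautB ors PySem.Dict.empty)) = [c] := by
        simp [htB]
      rw [hfc, List.reverse_append]
      simp only [List.reverse_cons, List.reverse_nil, List.nil_append, List.singleton_append]
      rcases c with _ | ⟨⟨k, b⟩, c2⟩
      · -- empty clause: kept by both
        simp only [pvLoopA, pvLoopB, ht', Bool.false_eq_true, if_false]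
        have h0 : ((([] : List (Int × Int)).length == 1) = false) := rfl
        simp only [h0, Bool.false_eq_true, if_false]
        have hsw : rs' ++ [] :: acc.reverse = rs' ++ (acc ++ [[]]).reverse := by simp
        rw [hsw, ih (acc ++ [[]]) f]
      rcases c2 with _ | ⟨q, t⟩
      · -- unit clause
        simp only [pvLoopA, pvLoopB, ht', Bool.false_eq_true, if_false]
        have h1 : ((([(k, b)] : List (Int × Int)).length == 1) = true) := rfl
        simp only [h1, if_true]
        cases hg : f.get? k with
        | none => rfl
        | some v =>
          dsimp only
          by_cases hv : (v == -b) = true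
          · rw [if_pos hv, if_pos hv]
          · rw [if_neg hv, if_neg hv, pv_pop_append]
            exact ih acc (f.insert k b)
      · -- clause with ≥ 2 literals: kept by both
        simp only [pvLoopA, pvLoopB, ht', Bool.false_eq_true, if_false]
        have h2 : ((((k, b) :: q :: t).length == 1) = false) := rfl
        simp only [h2, Bool.false_eq_true, if_false]
        have hsw : rs' ++ ((k, b) :: q :: t) :: acc.reverse
            = rs' ++ (acc ++ [(k, b) :: q :: t]).reverse := by simp
        rw [hsw, ih (acc ++ [(k, b) :: q :: t]) f]

-- ===== VERDICT (by name: the statement is the Claim_ definition above) =====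
theorem simplify_initial_spec : Claim_equal_simplify_initial := by
  intro rules facts _ _
  unfold Spec_simplify_initial simplify_initial simplify_initial_alt
  rw [pvRevEnum_eq]
  have := pvMain rules [] (PySem.Dict.ofList facts)
  simpa using this
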